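-- pv_equiv track=rewrite | github.com/grapheneaffiliate/h4-polytopic-attention | arc_final.py | solve_7b7f7511
-- ===== SOURCE A (Python) =====
-- def solve_7b7f7511(grid):
--     H, W = len(grid), len(grid[0])
--     for th in range(1, H + 1):
--         if H % th != 0:
--             continue
--         for tw in range(1, W + 1):
--             if W % tw != 0:
--                 continue
--             tile = [grid[r][:tw] for r in range(th)]
--             valid = True
--             for r in range(H):
--                 for c in range(W):
--                     if grid[r][c] != tile[r % th][c % tw]:
--                         valid = False
--                         break
--                 if not valid:
--                     break
--             if valid and (th < H or tw < W):
--                 return tile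
--     return grid
-- ===== SOURCE B (Python) =====
-- def solve_7b7f7511(grid):
--     H, W = len(grid), len(grid[0])
--     th0 = H
--     for th in range(1, H + 1):
--         if H % th == 0 and all(grid[r][:W] == grid[r - th][:W] for r in range(th, H)):
--             th0 = th
--             break
--     tw0 = W
--     for tw in range(1, W + 1):
--         if W % tw == 0 and all(row[tw:W] == row[:W - tw] for row in grid):
--             tw0 = tw
--             break
--     if th0 == H and tw0 == W:
--         return grid
--     return [row[:tw0] for row in grid[:th0]]
-- ===== Notes on version B (the rewrite author's own statement) =====
-- stated objective: faster
-- what changed: A scans every (tile-height, tile-width) divisor pair and re-validates the whole grid element by element for each pair; B computes the minimal vertical and the minimal horizontal period independently (one divisor scan each, checked by whole-row/slice comparisons) and combines them, returning the grid itself when no proper tile exists.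
-- outside the precondition, e.g. on solve_7b7f7511([[], []]): A returns [[], []], B returns [[]]
import Mathlib
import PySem

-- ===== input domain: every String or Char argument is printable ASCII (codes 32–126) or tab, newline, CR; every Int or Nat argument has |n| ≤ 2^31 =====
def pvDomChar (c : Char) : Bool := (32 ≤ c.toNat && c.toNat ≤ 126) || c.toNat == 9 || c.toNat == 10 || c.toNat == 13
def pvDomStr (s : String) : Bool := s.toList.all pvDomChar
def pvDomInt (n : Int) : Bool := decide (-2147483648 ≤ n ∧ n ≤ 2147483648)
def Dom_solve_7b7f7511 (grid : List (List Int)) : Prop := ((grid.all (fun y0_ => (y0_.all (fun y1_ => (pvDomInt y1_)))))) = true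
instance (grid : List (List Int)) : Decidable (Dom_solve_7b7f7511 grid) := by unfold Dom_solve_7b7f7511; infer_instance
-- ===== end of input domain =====

-- B replaces A's search over all (tile-height, tile-width) divisor pairs by two independent
-- one-dimensional minimal-period searches (objective: faster, asymptotic).

-- ===== PORT A =====

-- grid[r][c] (always in range on inputs admitted by Pre_)
def pvG (grid : List (List Int)) (r c : Nat) : Int := (grid.getD r []).getD c 0

-- tile = [grid[r][:tw] for r in range(th)]
def pvTile (grid : List (List Int)) (th tw : Nat) : List (List Int) :=
  (List.range th).map (fun r => (grid.getD r []).take tw)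

-- the 'valid' double loop with break: all r < H, c < W agree with the tile
def pvCheckA (grid tile : List (List Int)) (th tw H W : Nat) : Bool :=
  (List.range H).all (fun r => (List.range W).all (fun c =>
    pvG grid r c == pvG tile (r % th) (c % tw)))

-- inner 'for tw in range(1, W+1)' loop; 'some tile' = the return statement fired
def pvAInner (grid : List (List Int)) (H W th : Nat) : List Nat → Option (List (List Int))
  | [] => none
  | tw :: rest =>
    if W % tw ≠ 0 then pvAInner grid H W th rest
    else
      let tile := pvTile grid th tw
      if pvCheckA grid tile th tw H W && (decide (th < H) || decide (tw < W)) then some tile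
      else pvAInner grid H W th rest

-- outer 'for th in range(1, H+1)' loop; falls through to 'return grid'
def pvAOuter (grid : List (List Int)) (H W : Nat) : List Nat → List (List Int)
  | [] => grid
  | th :: rest =>
    if H % th ≠ 0 then pvAOuter grid H W rest
    else
      match pvAInner grid H W th (List.range' 1 W) with
      | some t => t
      | none => pvAOuter grid H W rest

def solve_7b7f7511 (grid : List (List Int)) : List (List Int) :=
  pvAOuter grid grid.length (grid.headD []).length (List.range' 1 grid.length)

-- ===== PORT B =====

-- vertical-period test: all(grid[r][:W] == grid[r - th][:W] for r in range(th, H))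
def pvPb (grid : List (List Int)) (H W th : Nat) : Bool :=
  (List.range' th (H - th)).all (fun r =>
    (grid.getD r []).take W == (grid.getD (r - th) []).take W)

-- horizontal-period test: all(row[tw:W] == row[:W - tw] for row in grid)
def pvQb (grid : List (List Int)) (H W tw : Nat) : Bool :=
  grid.all (fun row => (row.drop tw).take (W - tw) == row.take (W - tw))

-- B's 'for … if …: x0 = x; break' loop over a list of candidates, default d
def pvFirstD (p : Nat → Bool) (d : Nat) : List Nat → Nat
  | [] => d
  | x :: rest => if p x then x else pvFirstD p d rest

def solve_7b7f7511_alt (grid : List (List Int)) : List (List Int) :=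
  let H := grid.length
  let W := (grid.headD []).length
  let th0 := pvFirstD (fun th => (H % th == 0) && pvPb grid H W th) H (List.range' 1 H)
  let tw0 := pvFirstD (fun tw => (W % tw == 0) && pvQb grid H W tw) W (List.range' 1 W)
  if th0 == H && tw0 == W then grid
  else (grid.take th0).map (fun row => row.take tw0)

-- ===== PRECONDITION & SPEC =====
-- Pre_ excludes (a) empty grids and grids with a row shorter than row 0, on which A raises
-- IndexError, and (b) grids whose row 0 is empty (W = 0), a degenerate corner where A's
-- 'return grid' is an accident of its empty inner loop (B returns the 1-row empty tile).
def Pre_solve_7b7f7511 (grid : List (List Int)) : Prop :=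
  grid ≠ [] ∧ 0 < (grid.headD []).length ∧
    ∀ row ∈ grid, (grid.headD []).length ≤ row.length
instance (grid : List (List Int)) : Decidable (Pre_solve_7b7f7511 grid) := by
  unfold Pre_solve_7b7f7511; infer_instance

def pvWitness_solve_7b7f7511 : List (List Int) := [[1, 2], [1, 2]]

def Spec_solve_7b7f7511 (grid : List (List Int)) (out : List (List Int)) : Prop := out = solve_7b7f7511_alt grid
instance (grid : List (List Int)) (out : List (List Int)) : Decidable (Spec_solve_7b7f7511 grid out) := by unfold Spec_solve_7b7f7511; infer_instance

-- ===== CLAIM (what is proved, stated in full; the proofs are below) =====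
def Claim_equal_solve_7b7f7511 : Prop := ∀ (grid : List (List Int)), Dom_solve_7b7f7511 grid → Pre_solve_7b7f7511 grid → Spec_solve_7b7f7511 grid (solve_7b7f7511 grid)

-- ===== LEMMAS AND PROOFS =====

-- Prop forms of the period tests
def pvP (grid : List (List Int)) (H W th : Nat) : Prop :=
  ∀ r < H, ∀ c < W, pvG grid r c = pvG grid (r % th) c
def pvQ (grid : List (List Int)) (H W tw : Nat) : Prop :=
  ∀ r < H, ∀ c < W, pvG grid r c = pvG grid r (c % tw)

-- two truncated rows are BEq-equal iff they agree entrywise below W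
lemma take_beq_iff (xs ys : List Int) (W : Nat) (hx : W ≤ xs.length) (hy : W ≤ ys.length) :
    ((xs.take W == ys.take W) = true) ↔ ∀ c < W, xs.getD c 0 = ys.getD c 0 := by
  rw [beq_iff_eq]
  constructor
  · intro h c hc
    have := congrArg (fun l => l.getD c 0) h
    simpa [List.getD_eq_getElem?_getD, List.getElem?_take_of_lt hc] using this
  · intro h
    apply List.ext_getElem
    · simp; omega
    · intro i h1 h2
      have hiW : i < W := by simp at h1; omega
      have := h i hiW
      rw [List.getD_eq_getElem?_getD, List.getD_eq_getElem?_getD,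
        List.getElem?_eq_getElem (by omega : i < xs.length),
        List.getElem?_eq_getElem (by omega : i < ys.length)] at this
      simpa [List.getElem_take] using this

lemma rows_len (grid : List (List Int)) (W : Nat)
    (hrows : ∀ row ∈ grid, W ≤ row.length) (r : Nat) (hr : r < grid.length) :
    W ≤ (grid.getD r []).length := by
  apply hrows
  rw [List.getD_eq_getElem?_getD, List.getElem?_eq_getElem hr]
  exact List.getElem_mem hr

lemma pvPb_iff (grid : List (List Int)) (H W th : Nat) (hH : H = grid.length)
    (hrows : ∀ row ∈ grid, W ≤ row.length) (hth : 0 < th) (hthH : th ≤ H) :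
    pvPb grid H W th = true ↔ pvP grid H W th := by
  have hshift : pvPb grid H W th = true ↔
      ∀ r, th ≤ r → r < H → ∀ c < W, pvG grid r c = pvG grid (r - th) c := by
    unfold pvPb
    rw [List.all_eq_true]
    constructor
    · intro h r hr1 hr2 c hc
      have hm : r ∈ List.range' th (H - th) := by
        rw [List.mem_range'_1]; omega
      have := (take_beq_iff _ _ W
        (rows_len grid W hrows r (by omega))
        (rows_len grid W hrows (r - th) (by omega))).mp (h r hm)
      exact this c hc
    · intro h r hm
      rw [List.mem_range'_1] at hm
      exact (take_beq_iff _ _ W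
        (rows_len grid W hrows r (by omega))
        (rows_len grid W hrows (r - th) (by omega))).mpr
        (h r (by omega) (by omega))
  rw [hshift]
  unfold pvP
  constructor
  · intro h r
    induction r using Nat.strong_induction_on with
    | _ r ih =>
      intro hr c hc
      by_cases hrth : r < th
      · rw [Nat.mod_eq_of_lt hrth]
      · have h1 := h r (by omega) hr c hc
        have h2 := ih (r - th) (by omega) (by omega) c hc
        rw [← Nat.mod_eq_sub_mod (by omega)] at h2
        rw [h1, h2]
  · intro h r hr1 hr2 c hc
    have h1 := h r hr2 c hc
    have h2 := h (r - th) (by omega) c hc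
    rw [← Nat.mod_eq_sub_mod (by omega)] at h2
    rw [h1, h2]

lemma getD_drop (xs : List Int) (tw c : Nat) :
    (xs.drop tw).getD c 0 = xs.getD (tw + c) 0 := by
  simp only [List.getD_eq_getElem?_getD, List.getElem?_drop]

lemma pvQb_iff (grid : List (List Int)) (H W tw : Nat) (hH : H = grid.length)
    (hrows : ∀ row ∈ grid, W ≤ row.length) (htw : 0 < tw) :
    pvQb grid H W tw = true ↔ pvQ grid H W tw := by
  have hshift : pvQb grid H W tw = true ↔
      ∀ r < H, ∀ c, tw ≤ c → c < W → pvG grid r c = pvG grid r (c - tw) := by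
    unfold pvQb
    rw [List.all_eq_true]
    constructor
    · intro h r hr c hc1 hc2
      have hrow : grid.getD r [] ∈ grid := by
        rw [List.getD_eq_getElem?_getD, List.getElem?_eq_getElem (by omega : r < grid.length)]
        exact List.getElem_mem (by omega)
      have hlen := hrows _ hrow
      have hdlen : W - tw ≤ ((grid.getD r []).drop tw).length := by
        rw [List.length_drop]; omega
      have hmain := (take_beq_iff ((grid.getD r []).drop tw) (grid.getD r []) (W - tw)
        hdlen (by omega)).mp (h _ hrow) (c - tw) (by omega)
      rw [getD_drop, show tw + (c - tw) = c by omega] at hmain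
      unfold pvG
      exact hmain
    · intro h row hrow
      obtain ⟨r, hr, hrow'⟩ := List.mem_iff_getElem.mp hrow
      have hlen := hrows _ hrow
      have hdlen : W - tw ≤ (row.drop tw).length := by
        rw [List.length_drop]; omega
      apply (take_beq_iff (row.drop tw) row (W - tw) hdlen (by omega)).mpr
      intro c hc
      have hg : grid.getD r [] = row := by
        rw [List.getD_eq_getElem?_getD, List.getElem?_eq_getElem hr, hrow']
        rfl
      have h2 := h r (by omega) (tw + c) (by omega) (by omega)
      unfold pvG at h2
      rw [hg, show tw + c - tw = c by omega] at h2
      rw [getD_drop]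
      exact h2
  rw [hshift]
  unfold pvQ
  constructor
  · intro h r hr c
    induction c using Nat.strong_induction_on with
    | _ c ih =>
      intro hc
      by_cases hctw : c < tw
      · rw [Nat.mod_eq_of_lt hctw]
      · have h1 := h r hr c (by omega) hc
        have h2 := ih (c - tw) (by omega) (by omega)
        rw [← Nat.mod_eq_sub_mod (by omega)] at h2
        rw [h1, h2]
  · intro h r hr c hc1 hc2
    have h1 := h r hr c hc2
    have h2 := h r hr (c - tw) (by omega)
    rw [← Nat.mod_eq_sub_mod (by omega)] at h2
    rw [h1, h2]

-- reading inside the tile is reading the grid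
lemma pvG_tile (grid : List (List Int)) (th tw a b : Nat) (ha : a < th) (hb : b < tw) :
    pvG (pvTile grid th tw) a b = pvG grid a b := by
  unfold pvG pvTile
  rw [PySem.List.getD_map_range _ _ _ _ ha]
  simp [List.getD_eq_getElem?_getD, List.getElem?_take_of_lt hb]

-- A's tile check decomposes into B's two independent period checks
lemma check_decomp (grid : List (List Int)) (H W th tw : Nat)
    (hH : H = grid.length) (hrows : ∀ row ∈ grid, W ≤ row.length)
    (hth : 0 < th) (hthH : th ≤ H) (htw : 0 < tw) :
    pvCheckA grid (pvTile grid th tw) th tw H W = (pvPb grid H W th && pvQb grid H W tw) := by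
  have key : (∀ r < H, ∀ c < W, pvG grid r c = pvG grid (r % th) (c % tw)) ↔
      (pvP grid H W th ∧ pvQ grid H W tw) := by
    constructor
    · intro V
      constructor
      · intro r hr c hc
        have h1 := V r hr c hc
        have hrm : r % th < H := lt_of_lt_of_le (Nat.mod_lt r hth) hthH
        have h2 := V (r % th) hrm c hc
        rw [Nat.mod_mod] at h2
        rw [h1, h2]
      · intro r hr c hc
        have h1 := V r hr c hc
        have hcm : c % tw < W := lt_of_le_of_lt (Nat.mod_le c tw) hc
        have h2 := V r hr (c % tw) hcm
        rw [Nat.mod_mod] at h2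
        rw [h1, h2]
    · rintro ⟨hP, hQ⟩ r hr c hc
      have hrm : r % th < H := lt_of_lt_of_le (Nat.mod_lt r hth) hthH
      rw [hP r hr c hc, hQ (r % th) hrm c hc]
  have L : pvCheckA grid (pvTile grid th tw) th tw H W = true ↔
      (pvP grid H W th ∧ pvQ grid H W tw) := by
    rw [← key]
    unfold pvCheckA
    simp only [List.all_eq_true, List.mem_range, beq_iff_eq]
    constructor
    · intro h r hr c hc
      have := h r hr c hc
      rwa [pvG_tile grid th tw _ _ (Nat.mod_lt r hth) (Nat.mod_lt c htw)] at this
    · intro h r hr c hc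
      rw [pvG_tile grid th tw _ _ (Nat.mod_lt r hth) (Nat.mod_lt c htw)]
      exact h r hr c hc
  rw [← pvPb_iff grid H W th hH hrows hth hthH, ← pvQb_iff grid H W tw hH hrows htw] at L
  rw [Bool.eq_iff_iff]
  simpa [Bool.and_eq_true] using L

-- pvFirstD is find? with a default
lemma pvFirstD_eq (p : Nat → Bool) (d : Nat) (L : List Nat) :
    pvFirstD p d L = (List.find? p L).getD d := by
  induction L with
  | nil => rfl
  | cons x rest ih => by_cases h : p x <;> simp [pvFirstD, h, ih]

-- find? only looks at the predicate on members
lemma find?_congr_mem (p p' : Nat → Bool) (L : List Nat)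
    (h : ∀ x ∈ L, p x = p' x) : List.find? p L = List.find? p' L := by
  induction L with
  | nil => rfl
  | cons x rest ih =>
    have hx := h x (by simp)
    by_cases hp : p x <;>
      simp [hp, hx ▸ hp, ih fun y hy => h y (by simp [hy])]

-- a stronger predicate true at find?'s answer finds the same answer
lemma find?_mono (p p' : Nat → Bool) (L : List Nat) (x : Nat)
    (himp : ∀ y, p' y = true → p y = true) (hx : p' x = true)
    (hfind : List.find? p L = some x) : List.find? p' L = some x := by
  induction L with
  | nil => simp at hfind
  | cons z rest ih =>
    by_cases hz : p z
    · rw [List.find?_cons_of_pos hz] at hfind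
      have : z = x := by simpa using hfind
      subst this
      rw [List.find?_cons_of_pos hx]
    · have hz' : p' z = false := by
        cases h' : p' z
        · rfl
        · exact absurd (himp z h') (by simp [hz])
      rw [List.find?_cons_of_neg hz] at hfind
      rw [List.find?_cons_of_neg (by simp [hz'])]
      exact ih hfind

-- A's inner loop is find? over the tw candidates, mapped to the tile
lemma inner_eq (grid : List (List Int)) (H W th : Nat) (L : List Nat) :
    pvAInner grid H W th L =
      (List.find? (fun tw => (W % tw == 0) &&
          (pvCheckA grid (pvTile grid th tw) th tw H W &&
            (decide (th < H) || decide (tw < W)))) L).map (pvTile grid th) := by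
  induction L with
  | nil => rfl
  | cons tw rest ih =>
    by_cases h0 : W % tw = 0
    · by_cases hc : (pvCheckA grid (pvTile grid th tw) th tw H W &&
          (decide (th < H) || decide (tw < W))) = true
      · simp [pvAInner, h0, hc]
      · simp only [Bool.not_eq_true] at hc
        simp [pvAInner, h0, hc, ih]
    · simp [pvAInner, h0, ih]

-- vertical period H and horizontal period W always hold
lemma pvPb_self (grid : List (List Int)) (H W : Nat) : pvPb grid H W H = true := by
  unfold pvPb
  simp

lemma pvQb_self (grid : List (List Int)) (H W : Nat) : pvQb grid H W W = true := by
  unfold pvQb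
  rw [List.all_eq_true]
  intro row _
  simp

-- the tile at (th, tw) is grid truncated, when th ≤ H
lemma tile_eq_take (grid : List (List Int)) (th tw : Nat) (h : th ≤ grid.length) :
    pvTile grid th tw = (grid.take th).map (fun row => row.take tw) := by
  apply List.ext_getElem
  · simp [pvTile]; omega
  · intro i h1 h2
    simp only [pvTile, List.getElem_map, List.getElem_range, List.getElem_take]
    have hi : i < grid.length := by simp [pvTile] at h1; omega
    rw [List.getD_eq_getElem?_getD, List.getElem?_eq_getElem hi]
    rfl

-- B's predicates, named
def pvPredV (grid : List (List Int)) (H W : Nat) : Nat → Bool :=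
  fun th => (H % th == 0) && pvPb grid H W th
def pvPredH (grid : List (List Int)) (H W : Nat) : Nat → Bool :=
  fun tw => (W % tw == 0) && pvQb grid H W tw

-- A's outer loop characterised by the two find?s
lemma outer_spec (grid : List (List Int)) (H W : Nat) (hW : 0 < W)
    (hH : H = grid.length) (hrows : ∀ row ∈ grid, W ≤ row.length) :
    ∀ L : List Nat, (∀ th ∈ L, 0 < th ∧ th ≤ H) → L.Pairwise (· < ·) →
    pvAOuter grid H W L =
      (match List.find? (pvPredV grid H W) L with
       | none => grid
       | some th =>
         match List.find? (fun tw => pvPredH grid H W tw &&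
             (decide (th < H) || decide (tw < W))) (List.range' 1 W) with
         | some tw => pvTile grid th tw
         | none => grid) := by
  intro L
  induction L with
  | nil => intro _ _; rfl
  | cons th rest ih =>
    intro hmem hpw
    have hth : 0 < th ∧ th ≤ H := hmem th (by simp)
    have hrest : ∀ x ∈ rest, 0 < x ∧ x ≤ H := fun x hx => hmem x (by simp [hx])
    have hpwrest : rest.Pairwise (· < ·) := hpw.of_cons
    by_cases hdiv : H % th = 0
    · cases hPb : pvPb grid H W th with
      | false =>
        have hnone : pvAInner grid H W th (List.range' 1 W) = none := by
          rw [inner_eq, List.find?_eq_none.mpr, Option.map_none]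
          intro tw htw
          have htw' : 0 < tw ∧ tw ≤ W := by
            rw [List.mem_range'_1] at htw; omega
          by_cases h0 : W % tw = 0
          · rw [check_decomp grid H W th tw hH hrows hth.1 hth.2 htw'.1, hPb]
            simp
          · have h0' : (W % tw == 0) = false := by simpa using h0
            simp [h0']
        have hv : pvPredV grid H W th = false := by simp [pvPredV, hPb]
        have hstep : pvAOuter grid H W (th :: rest) = pvAOuter grid H W rest := by
          simp only [pvAOuter]
          rw [if_neg (by omega), hnone]
        rw [hstep, List.find?_cons_of_neg (by simp [hv])]
        exact ih hrest hpwrest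
      | true =>
        have h : pvAInner grid H W th (List.range' 1 W) =
            (List.find? (fun tw => pvPredH grid H W tw &&
              (decide (th < H) || decide (tw < W))) (List.range' 1 W)).map (pvTile grid th) := by
          rw [inner_eq]
          congr 1
          apply find?_congr_mem
          intro tw htw
          have htw' : 0 < tw ∧ tw ≤ W := by
            rw [List.mem_range'_1] at htw; omega
          by_cases h0 : W % tw = 0
          · rw [check_decomp grid H W th tw hH hrows hth.1 hth.2 htw'.1, hPb]
            simp [pvPredH, Bool.and_assoc]
          · have h0' : (W % tw == 0) = false := by simpa using h0
            simp [pvPredH, h0']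
        have hv : pvPredV grid H W th = true := by simp [pvPredV, hdiv, hPb]
        have hfv : List.find? (pvPredV grid H W) (th :: rest) = some th :=
          List.find?_cons_of_pos hv
        rw [hfv]
        show pvAOuter grid H W (th :: rest) =
          match List.find? (fun tw => pvPredH grid H W tw &&
              (decide (th < H) || decide (tw < W))) (List.range' 1 W) with
          | some tw => pvTile grid th tw
          | none => grid
        cases hF : List.find? (fun tw => pvPredH grid H W tw &&
            (decide (th < H) || decide (tw < W))) (List.range' 1 W) with
        | some tw =>
          have hstep : pvAOuter grid H W (th :: rest) = pvTile grid th tw := by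
            simp only [pvAOuter]
            rw [if_neg (by omega), h, hF]
            rfl
          exact hstep
        | none =>
          -- th must be H, and rest is then empty
          have hthH : th = H := by
            by_contra hne
            have hlt : th < H := lt_of_le_of_ne hth.2 hne
            have hWmem : W ∈ List.range' 1 W := by rw [List.mem_range'_1]; omega
            have := List.find?_eq_none.mp hF W hWmem
            simp [pvPredH, Nat.mod_self, pvQb_self, hlt] at this
          have hrestnil : rest = [] := by
            by_contra hne
            match rest, hne with
            | x :: rest', _ =>
              have hx := hrest x (by simp)
              have := (List.pairwise_cons.mp hpw).1 x (by simp)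
              omega
          have hstep : pvAOuter grid H W (th :: rest) = pvAOuter grid H W rest := by
            simp only [pvAOuter]
            rw [if_neg (by omega), h, hF]
            rfl
          rw [hstep, hrestnil]
          rfl
    · have hv : pvPredV grid H W th = false := by simp [pvPredV, hdiv]
      have hstep : pvAOuter grid H W (th :: rest) = pvAOuter grid H W rest := by
        simp only [pvAOuter]
        rw [if_pos (by omega)]
      rw [hstep, List.find?_cons_of_neg (by simp [hv])]
      exact ih hrest hpwrest

-- minimality transfer for the W-period: below the first satisfier everything fails
lemma no_smaller_predH (grid : List (List Int)) (H W : Nat) (hW : 0 < W)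
    (hfind : List.find? (pvPredH grid H W) (List.range' 1 W) = some W) :
    ∀ tw ∈ List.range' 1 W, tw < W → pvPredH grid H W tw = false := by
  have hsplit : List.range' 1 (W - 1) ++ List.range' W 1 = List.range' 1 W := by
    have := List.range'_append_1 (s := 1) (m := W - 1) (n := 1)
    rw [show 1 + (W - 1) = W by omega, show W - 1 + 1 = W by omega] at this
    exact this
  rw [← hsplit, List.find?_append] at hfind
  have hl1 : List.find? (pvPredH grid H W) (List.range' 1 (W - 1)) = none := by
    cases hc : List.find? (pvPredH grid H W) (List.range' 1 (W - 1)) with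
    | none => rfl
    | some y =>
      have hy := List.mem_of_find?_eq_some hc
      rw [List.mem_range'_1] at hy
      rw [hc] at hfind
      simp at hfind
      omega
  intro tw htw hlt
  rw [List.mem_range'_1] at htw
  have : tw ∈ List.range' 1 (W - 1) := by rw [List.mem_range'_1]; omega
  have := List.find?_eq_none.mp hl1 tw this
  simpa using this

-- ===== VERDICT (by name: the statement is the Claim_ definition above) =====
theorem solve_7b7f7511_spec : Claim_equal_solve_7b7f7511 := by
  intro grid _ hpre
  obtain ⟨hne, hWpos, hrows⟩ := hpre
  have hH : 0 < grid.length := List.length_pos_of_ne_nil hne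
  unfold Spec_solve_7b7f7511 solve_7b7f7511 solve_7b7f7511_alt
  set H := grid.length with hHdef
  set W := (grid.headD []).length with hWdef
  have hVH : pvPredV grid H W H = true := by
    simp [pvPredV, Nat.mod_self, pvPb_self]
  have hHW : pvPredH grid H W W = true := by
    simp [pvPredH, Nat.mod_self, pvQb_self]
  have hHmem : H ∈ List.range' 1 H := by rw [List.mem_range'_1]; omega
  have hWmem : W ∈ List.range' 1 W := by rw [List.mem_range'_1]; omega
  obtain ⟨th0, hfindV⟩ : ∃ x, List.find? (pvPredV grid H W) (List.range' 1 H) = some x := by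
    cases hfv : List.find? (pvPredV grid H W) (List.range' 1 H) with
    | none => exact absurd (List.find?_eq_none.mp hfv H hHmem) (by simp [hVH])
    | some x => exact ⟨x, rfl⟩
  obtain ⟨tw0, hfindH⟩ : ∃ x, List.find? (pvPredH grid H W) (List.range' 1 W) = some x := by
    cases hfw : List.find? (pvPredH grid H W) (List.range' 1 W) with
    | none => exact absurd (List.find?_eq_none.mp hfw W hWmem) (by simp [hHW])
    | some x => exact ⟨x, rfl⟩
  have hth0b : 1 ≤ th0 ∧ th0 ≤ H := by
    have := List.mem_of_find?_eq_some hfindV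
    rw [List.mem_range'_1] at this; omega
  have htw0b : 1 ≤ tw0 ∧ tw0 ≤ W := by
    have := List.mem_of_find?_eq_some hfindH
    rw [List.mem_range'_1] at this; omega
  have hQtw0 : pvPredH grid H W tw0 = true := List.find?_some hfindH
  have hpwH : (List.range' 1 H).Pairwise (· < ·) := List.pairwise_lt_range' (s := 1) (n := H)
  have hmemH : ∀ th ∈ List.range' 1 H, 0 < th ∧ th ≤ H := by
    intro th hth; rw [List.mem_range'_1] at hth; omega
  have hA := outer_spec grid H W hWpos hHdef (by simpa using hrows) (List.range' 1 H) hmemH hpwH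
  rw [hA, hfindV]
  show (match List.find? (fun tw => pvPredH grid H W tw &&
      (decide (th0 < H) || decide (tw < W))) (List.range' 1 W) with
    | some tw => pvTile grid th0 tw
    | none => grid) = _
  simp only [pvFirstD_eq]
  have hpredV : (fun th => (H % th == 0) && pvPb grid H W th) = pvPredV grid H W := rfl
  have hpredH : (fun tw => (W % tw == 0) && pvQb grid H W tw) = pvPredH grid H W := rfl
  rw [hpredV, hpredH, hfindV, hfindH]
  simp only [Option.getD_some]
  by_cases hth0 : th0 = H
  · have hcongr : List.find? (fun tw => pvPredH grid H W tw &&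
        (decide (th0 < H) || decide (tw < W))) (List.range' 1 W) =
        List.find? (fun tw => pvPredH grid H W tw && decide (tw < W)) (List.range' 1 W) := by
      apply find?_congr_mem
      intro tw _
      simp [hth0]
    rw [hcongr]
    by_cases htw0 : tw0 = W
    · have hnone : List.find? (fun tw => pvPredH grid H W tw && decide (tw < W))
          (List.range' 1 W) = none := by
        rw [List.find?_eq_none]
        intro tw htw
        cases hc : pvPredH grid H W tw with
        | false => simp
        | true  =>
          have hlt : ¬ tw < W := by
            intro hlt
            have := no_smaller_predH grid H W hWpos (htw0 ▸ hfindH) tw htw hlt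
            rw [hc] at this; exact absurd this (by simp)
          simp [hlt]
      rw [hnone]
      simp [hth0, htw0]
    · have htw0lt : tw0 < W := lt_of_le_of_ne htw0b.2 htw0
      have hsome : List.find? (fun tw => pvPredH grid H W tw && decide (tw < W))
          (List.range' 1 W) = some tw0 := by
        apply find?_mono (pvPredH grid H W) _ (List.range' 1 W) tw0 _ _ hfindH
        · intro y hy
          exact (Bool.and_eq_true _ _).mp hy |>.1
        · simp [hQtw0, htw0lt]
      rw [hsome]
      have hif : (th0 == H && tw0 == W) = false := by
        simp only [Bool.and_eq_false_iff, beq_eq_false_iff_ne]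
        right; omega
      rw [hif]
      simp only [Bool.false_eq_true, if_false]
      exact tile_eq_take grid th0 tw0 hth0b.2
  · have hth0lt : th0 < H := lt_of_le_of_ne hth0b.2 hth0
    have hcongr : List.find? (fun tw => pvPredH grid H W tw &&
        (decide (th0 < H) || decide (tw < W))) (List.range' 1 W) =
        List.find? (pvPredH grid H W) (List.range' 1 W) := by
      apply find?_congr_mem
      intro tw _
      simp [hth0lt]
    rw [hcongr, hfindH]
    have hif : (th0 == H && tw0 == W) = false := by
      simp only [Bool.and_eq_false_iff, beq_eq_false_iff_ne]
      left; omega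
    rw [hif]
    simp only [Bool.false_eq_true, if_false]
    exact tile_eq_take grid th0 tw0 hth0b.2
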